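-- pv_equiv track=rewrite | github.com/aedan-leavitt/CS4110-Coding-Project | formal_languages_assignment.py | kleene_closure_generator
-- ===== SOURCE A (Python) =====
-- def kleene_closure_generator(base_language, max_length):
--     """
--     Generate all strings in L* (Kleene closure) up to max_length
--
--     Args:
--         base_language (list): List of strings representing the base language
--         max_length (int): Maximum length of generated strings
--
--     Returns:
--         set: Set of all strings in L* with length <= max_length
--
--     Example:
--         kleene_closure_generator(["a", "bb"], 4) should include:
--         - "" (empty string, always in L*)
--         - "a", "bb" (from L¹)
--         - "aa", "abb", "bba", "bbbb" (from L²)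
--         - etc.
--     """
--     # Your implementation here
--     result = set()
--     result.add("")  # Include the empty string
--     def generate(current_string):
--         if len(current_string) > max_length: # check length constraint
--             return
--         if current_string != "": # check if the string is not empty, if it is, it is already in the set from before generate function
--             result.add(current_string)
--         for word in base_language: # iterate through each word in the base language
--             generate(current_string + word) # add the word to the current string
--     generate("") # start with an empty string
--     return result
--     pass
-- ===== SOURCE B (Python) =====
-- def kleene_closure_generator(base_language, max_length):
--     """Iterative memoized DFS: each distinct string is expanded exactly once."""
--     closure = set()
--     stack = [""]
--     while stack:
--         s = stack.pop()
--         if len(s) <= max_length and s not in closure: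
--             closure.add(s)
--             for w in reversed(base_language):
--                 stack.append(s + w)
--     closure.add("")  # the empty string is in L* even when max_length < 0
--     return closure
-- ===== Notes on version B (the rewrite author's own statement) =====
-- stated objective: alternative
-- what changed: B replaces A's naive recursive DFS, which re-explores the whole subtree of every concatenation path, by an iterative explicit-stack DFS with a visited set that expands each distinct string exactly once.
import Mathlib
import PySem

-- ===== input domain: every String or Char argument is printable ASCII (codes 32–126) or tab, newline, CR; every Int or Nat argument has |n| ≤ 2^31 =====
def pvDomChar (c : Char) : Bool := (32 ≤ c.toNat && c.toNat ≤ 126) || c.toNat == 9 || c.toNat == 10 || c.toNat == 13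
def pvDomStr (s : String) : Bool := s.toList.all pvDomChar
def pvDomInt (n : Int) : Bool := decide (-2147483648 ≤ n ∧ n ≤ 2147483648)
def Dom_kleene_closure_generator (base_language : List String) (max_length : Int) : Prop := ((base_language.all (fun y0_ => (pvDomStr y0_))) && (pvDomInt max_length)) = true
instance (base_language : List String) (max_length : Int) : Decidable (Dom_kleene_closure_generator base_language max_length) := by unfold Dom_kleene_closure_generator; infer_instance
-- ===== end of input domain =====

-- B replaces A's naive recursive DFS (which re-explores the whole subtree of every
-- concatenation path) by an iterative explicit-stack DFS with a visited set, expanding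
-- each distinct string exactly once (objective: alternative).
-- Strings are modelled as List Char internally (PySem convention: prove string facts on
-- the list side); the returned set is a PySem.Set in first-insertion order.

-- ===== PORT A =====
-- result.add(current_string) only when current_string != "" (the "" is added up front)
def pvAddNE (res : PySem.Set (List Char)) (cur : List Char) : PySem.Set (List Char) :=
  if cur ≠ [] then PySem.Set.add res cur else res

-- the nested recursive 'generate'; the Nat argument is fuel making the Lean recursion
-- structural — (max_length.toNat + 3) is enough on every input Pre_ admits, where the
-- recursion depth is bounded because each word is non-empty
def pvGenA (bl : List (List Char)) (ml : Int) : Nat → PySem.Set (List Char) → List Char → PySem.Set (List Char)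
  | 0, res, _ => res
  | f + 1, res, cur =>
      if (cur.length : Int) > ml then res
      else bl.foldl (fun r w => pvGenA bl ml f r (cur ++ w)) (pvAddNE res cur)

def kleene_closure_generator (base_language : List String) (max_length : Int) : List String :=
  -- result = set(); result.add("")
  (pvGenA (base_language.map String.toList) max_length (max_length.toNat + 3)
      (PySem.Set.add PySem.Set.empty []) []).map (fun cs => String.ofList cs)

-- ===== PORT B =====
-- the while-loop of Source B: explicit stack (head = top), memoized via the closure set;
-- 'for w in reversed(base_language): stack.append(s + w)' puts the words back on top in
-- original order, i.e. prepends 'bl.map (s ++ ·)'.  The Nat argument is fuel making the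
-- loop structural; (base_language.length + 1) ^ (max_length.toNat + 2) iterations are
-- enough on every input Pre_ admits (proved in pvLoopB_main below)
def pvLoopB (bl : List (List Char)) (ml : Int) : Nat → List (List Char) → PySem.Set (List Char) → PySem.Set (List Char)
  | 0, _, cl => cl
  | _ + 1, [], cl => cl
  | f + 1, s :: rest, cl =>
      if (s.length : Int) ≤ ml ∧ PySem.Set.contains cl s = false then
        pvLoopB bl ml f ((bl.map fun w => s ++ w) ++ rest) (PySem.Set.add cl s)
      else pvLoopB bl ml f rest cl

def kleene_closure_generator_alt (base_language : List String) (max_length : Int) : List String :=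
  -- closure = set(); stack = [""]; while stack: …; closure.add("")
  (PySem.Set.add (pvLoopB (base_language.map String.toList) max_length
      ((base_language.length + 1) ^ (max_length.toNat + 2)) [[]] PySem.Set.empty) []).map
    (fun cs => String.ofList cs)

-- ===== PRECONDITION & SPEC =====
-- Pre_ excludes inputs with "" in base_language and max_length ≥ 0: there A's 'generate'
-- recurses forever on current_string + "" and raises RecursionError (it never returns).
-- (With max_length < 0 the recursion stops at once and A returns {""} even then.)
def Pre_kleene_closure_generator (base_language : List String) (max_length : Int) : Prop :=
  max_length < 0 ∨ "" ∉ base_language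
instance (base_language : List String) (max_length : Int) : Decidable (Pre_kleene_closure_generator base_language max_length) := by unfold Pre_kleene_closure_generator; infer_instance

def pvWitness_kleene_closure_generator : List String × Int := (["a", "bb"], 4)

def Spec_kleene_closure_generator (base_language : List String) (max_length : Int) (out : List String) : Prop := out = kleene_closure_generator_alt base_language max_length
instance (base_language : List String) (max_length : Int) (out : List String) : Decidable (Spec_kleene_closure_generator base_language max_length out) := by unfold Spec_kleene_closure_generator; infer_instance

-- ===== CLAIM (what is proved, stated in full; the proofs are below) =====
def Claim_equal_kleene_closure_generator : Prop := ∀ (base_language : List String) (max_length : Int), Dom_kleene_closure_generator base_language max_length → Pre_kleene_closure_generator base_language max_length → Spec_kleene_closure_generator base_language max_length (kleene_closure_generator base_language max_length)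

-- ===== LEMMAS AND PROOFS =====

-- the (fuelled) list of strings A's 'generate(s)' inserts, in insertion order
def pvReach (bl : List (List Char)) (ml : Int) : Nat → List Char → List (List Char)
  | 0, _ => []
  | f + 1, s =>
      if (s.length : Int) > ml then []
      else s :: bl.flatMap (fun w => pvReach bl ml f (s ++ w))

-- canonical fuel: enough for every start string
def pvRch (bl : List (List Char)) (ml : Int) (s : List Char) : List (List Char) :=
  pvReach bl ml (ml.toNat + 3) s

theorem pvReach_stab (bl : List (List Char)) (ml : Int) (hw : ∀ w ∈ bl, w ≠ []) :
    ∀ (f g : Nat) (s : List Char), (s.length : Int) + f ≥ ml + 2 → (s.length : Int) + g ≥ ml + 2 →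
      pvReach bl ml f s = pvReach bl ml g s := by
  intro f
  induction f with
  | zero =>
    intro g s hf hg
    have hlen : (s.length : Int) > ml := by omega
    cases g with
    | zero => rfl
    | succ g => simp [pvReach, hlen]
  | succ f ih =>
    intro g s hf hg
    cases g with
    | zero =>
      have hlen : (s.length : Int) > ml := by omega
      simp [pvReach, hlen]
    | succ g =>
      by_cases hlen : (s.length : Int) > ml
      · simp [pvReach, hlen]
      · simp only [pvReach, if_neg hlen]
        congr 1
        refine List.flatMap_congr (fun w hwmem => ?_)
        have hlw : 0 < w.length := List.length_pos_iff.mpr (hw w hwmem)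
        apply ih <;> · simp only [List.length_append]; push_cast; omega

theorem pvRch_eq_nil (bl : List (List Char)) (ml : Int) (s : List Char)
    (h : (s.length : Int) > ml) : pvRch bl ml s = [] := by
  show pvReach bl ml ((ml.toNat + 2) + 1) s = []
  simp [pvReach, h]

theorem pvGenA_succ (bl : List (List Char)) (ml : Int) (f : Nat)
    (res : PySem.Set (List Char)) (cur : List Char) :
    pvGenA bl ml (f + 1) res cur
      = if (cur.length : Int) > ml then res
        else bl.foldl (fun r w => pvGenA bl ml f r (cur ++ w)) (pvAddNE res cur) := rfl

theorem pvReach_succ (bl : List (List Char)) (ml : Int) (f : Nat) (s : List Char) :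
    pvReach bl ml (f + 1) s
      = if (s.length : Int) > ml then [] else s :: bl.flatMap (fun w => pvReach bl ml f (s ++ w)) := rfl

theorem pvRch_cons (bl : List (List Char)) (ml : Int) (hw : ∀ w ∈ bl, w ≠ [])
    (s : List Char) (h : ¬ (s.length : Int) > ml) :
    pvRch bl ml s = s :: bl.flatMap (fun w => pvRch bl ml (s ++ w)) := by
  show pvReach bl ml ((ml.toNat + 2) + 1) s = _
  rw [pvReach_succ, if_neg h]
  congr 1
  refine List.flatMap_congr (fun w hwmem => ?_)
  have hlw : 0 < w.length := List.length_pos_iff.mpr (hw w hwmem)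
  have hml : ml ≤ (ml.toNat : Int) := Int.self_le_toNat ml
  apply pvReach_stab bl ml hw <;> · simp only [List.length_append]; push_cast; omega

-- A's generate just inserts pvReach, in order
theorem pvGenA_eq_update (bl : List (List Char)) (ml : Int) :
    ∀ (f : Nat) (res : PySem.Set (List Char)) (s : List Char), [] ∈ res →
      pvGenA bl ml f res s = PySem.Set.update res (pvReach bl ml f s) := by
  intro f
  induction f with
  | zero => intro res s _; simp [pvGenA, pvReach, PySem.Set.update_nil]
  | succ f ih =>
    intro res s hmem
    by_cases hlen : (s.length : Int) > ml
    · simp [pvGenA, pvReach, hlen, PySem.Set.update_nil]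
    · simp only [pvGenA, pvReach, if_neg hlen]
      have haddNE : pvAddNE res s = PySem.Set.add res s := by
        unfold pvAddNE
        by_cases hs : s = []
        · subst hs; simp [PySem.Set.add_of_mem hmem]
        · simp [hs]
      have sub : ∀ (ws : List (List Char)) (r : PySem.Set (List Char)), [] ∈ r →
          ws.foldl (fun r w => pvGenA bl ml f r (s ++ w)) r
            = PySem.Set.update r (ws.flatMap fun w => pvReach bl ml f (s ++ w)) := by
        intro ws
        induction ws with
        | nil => intro r _; simp [PySem.Set.update_nil]
        | cons w ws ihw =>
          intro r hr
          rw [List.foldl_cons, ih r (s ++ w) hr, List.flatMap_cons, PySem.Set.update_append,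
            ihw _ (by simp [PySem.Set.mem_update, hr])]
      rw [haddNE, PySem.Set.update_cons, sub bl _ (by simp [PySem.Set.mem_add, hmem])]

theorem pvUpdate_of_subset {α : Type} [BEq α] [LawfulBEq α] (s : PySem.Set α) (l : List α)
    (h : ∀ x ∈ l, x ∈ s) : PySem.Set.update s l = s := by
  induction l generalizing s with
  | nil => exact PySem.Set.update_nil s
  | cons x l ihl =>
    rw [PySem.Set.update_cons, PySem.Set.add_of_mem (h x (List.mem_cons_self))]
    exact ihl s (fun y hy => h y (List.mem_cons_of_mem x hy))

-- membership in pvRch: exactly the concatenations of base words that stay within ml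
theorem pvReach_elim (bl : List (List Char)) (ml : Int) :
    ∀ (f : Nat) (s u : List Char), u ∈ pvReach bl ml f s →
      (u.length : Int) ≤ ml ∧ ∃ ws : List (List Char), (∀ w ∈ ws, w ∈ bl) ∧ u = s ++ ws.flatten := by
  intro f
  induction f with
  | zero => intro s u hu; simp [pvReach] at hu
  | succ f ih =>
    intro s u hu
    rw [pvReach_succ] at hu
    by_cases hl : (s.length : Int) > ml
    · simp [hl] at hu
    · rw [if_neg hl] at hu
      rcases List.mem_cons.1 hu with rfl | hu
      · exact ⟨by omega, [], by simp, by simp⟩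
      · rw [List.mem_flatMap] at hu
        obtain ⟨w, hwbl, hu⟩ := hu
        obtain ⟨hlen, ws, hws, rfl⟩ := ih (s ++ w) u hu
        refine ⟨hlen, w :: ws, ?_, by simp⟩
        intro w' hw'
        rcases List.mem_cons.1 hw' with rfl | hw'
        · exact hwbl
        · exact hws w' hw'

theorem pvRch_intro (bl : List (List Char)) (ml : Int) (hw : ∀ w ∈ bl, w ≠ []) :
    ∀ (ws : List (List Char)) (s : List Char), (∀ w ∈ ws, w ∈ bl) →
      (((s ++ ws.flatten).length : Int)) ≤ ml → s ++ ws.flatten ∈ pvRch bl ml s := by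
  intro ws
  induction ws with
  | nil =>
    intro s _ hlen
    rw [List.flatten_nil, List.append_nil] at hlen ⊢
    rw [pvRch_cons bl ml hw s (by omega)]
    exact List.mem_cons_self
  | cons w ws ih =>
    intro s hmem hlen
    have hwbl : w ∈ bl := hmem w List.mem_cons_self
    have hle : ¬ (s.length : Int) > ml := by
      simp only [List.length_append, List.flatten_cons] at hlen
      push_cast at hlen ⊢
      omega
    rw [pvRch_cons bl ml hw s hle]
    refine List.mem_cons_of_mem _ (List.mem_flatMap.2 ⟨w, hwbl, ?_⟩)
    have h1 : s ++ (w :: ws).flatten = (s ++ w) ++ ws.flatten := by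
      simp [List.flatten_cons]
    rw [h1] at hlen
    have := ih (s ++ w) (fun w' hw' => hmem w' (List.mem_cons_of_mem _ hw')) hlen
    rwa [← h1] at this

theorem pvRch_trans (bl : List (List Char)) (ml : Int) (hw : ∀ w ∈ bl, w ≠ [])
    (s t u : List Char) (ht : t ∈ pvRch bl ml s) (hu : u ∈ pvRch bl ml t) :
    u ∈ pvRch bl ml s := by
  obtain ⟨_, ws1, h1, rfl⟩ := pvReach_elim bl ml _ _ _ ht
  obtain ⟨hlu, ws2, h2, rfl⟩ := pvReach_elim bl ml _ _ _ hu
  have hcat : s ++ ws1.flatten ++ ws2.flatten = s ++ (ws1 ++ ws2).flatten := by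
    rw [List.flatten_append, List.append_assoc]
  have hmem : ∀ w ∈ ws1 ++ ws2, w ∈ bl := by
    intro w hwm
    rcases List.mem_append.1 hwm with h | h
    · exact h1 w h
    · exact h2 w h
  have := pvRch_intro bl ml hw (ws1 ++ ws2) s hmem (by rw [← hcat]; exact hlu)
  rwa [← hcat] at this

-- the termination potential of a stack entry / of the whole stack
def pvBeta (ml : Int) (s : List Char) : Nat := (ml.toNat + 2) - s.length

def pvMu (bl : List (List Char)) (ml : Int) (st : List (List Char)) : Nat :=
  (st.map fun s => (bl.length + 1) ^ pvBeta ml s).sum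

-- the DFS stack invariant: each pending entry carries its (ghost) open ancestors, all
-- strictly shorter; every closure member is open or has its whole subtree in the
-- closure; and this keeps holding after the entry's subtree is merged in
def pvInv (bl : List (List Char)) (ml : Int) :
    PySem.Set (List Char) → List ((List Char) × List (List Char)) → Prop
  | _, [] => True
  | cl, (e, O) :: rest =>
      (∀ o ∈ O, o.length < e.length) ∧
      (∀ t ∈ cl, t ∈ O ∨ ∀ u ∈ pvRch bl ml t, u ∈ cl) ∧
      pvInv bl ml (PySem.Set.update cl (pvRch bl ml e)) rest

theorem pvLoopB_succ_cons (bl : List (List Char)) (ml : Int) (f : Nat)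
    (s : List Char) (rest : List (List Char)) (cl : PySem.Set (List Char)) :
    pvLoopB bl ml (f + 1) (s :: rest) cl
      = if (s.length : Int) ≤ ml ∧ PySem.Set.contains cl s = false then
          pvLoopB bl ml f ((bl.map fun w => s ++ w) ++ rest) (PySem.Set.add cl s)
        else pvLoopB bl ml f rest cl := rfl

-- pushing an expanded entry's children preserves the invariant
theorem pvInv_children (bl : List (List Char)) (ml : Int) (hw : ∀ w ∈ bl, w ≠ [])
    (e : List Char) (O : List (List Char)) (ha : ∀ o ∈ O, o.length < e.length) :
    ∀ (ws : List (List Char)) (cl : PySem.Set (List Char))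
      (ps : List ((List Char) × List (List Char))),
      (∀ w ∈ ws, w ∈ bl) →
      (∀ t ∈ cl, t ∈ e :: O ∨ ∀ u ∈ pvRch bl ml t, u ∈ cl) →
      pvInv bl ml (PySem.Set.update cl (ws.flatMap fun w => pvRch bl ml (e ++ w))) ps →
      pvInv bl ml cl ((ws.map fun w => (e ++ w, e :: O)) ++ ps) := by
  intro ws
  induction ws with
  | nil =>
    intro cl ps _ _ hps
    simpa [PySem.Set.update_nil] using hps
  | cons w ws ihw =>
    intro cl ps hmem hcl hps
    have hwbl : w ∈ bl := hmem w List.mem_cons_self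
    have hlw : 0 < w.length := List.length_pos_iff.mpr (hw w hwbl)
    rw [List.map_cons, List.cons_append]
    refine ⟨?_, hcl, ?_⟩
    · intro o ho
      rcases List.mem_cons.1 ho with rfl | ho
      · simp only [List.length_append]; omega
      · have := ha o ho; simp only [List.length_append]; omega
    · refine ihw _ _ (fun w' hw' => hmem w' (List.mem_cons_of_mem _ hw')) ?_ ?_
      · intro t ht
        rcases (PySem.Set.mem_update _ _ _).1 ht with ht | ht
        · rcases hcl t ht with h | h
          · exact Or.inl h
          · exact Or.inr fun u hu => (PySem.Set.mem_update _ _ _).2 (Or.inl (h u hu))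
        · exact Or.inr fun u hu =>
            (PySem.Set.mem_update _ _ _).2 (Or.inr (pvRch_trans bl ml hw _ t u ht hu))
      · rw [List.flatMap_cons, PySem.Set.update_append] at hps
        exact hps

-- the loop inserts exactly the pending subtrees, in DFS order
theorem pvLoopB_main (bl : List (List Char)) (ml : Int) (hw : ∀ w ∈ bl, w ≠ []) :
    ∀ (f : Nat) (ps : List ((List Char) × List (List Char))) (cl : PySem.Set (List Char)),
      f ≥ pvMu bl ml (ps.map Prod.fst) →
      pvInv bl ml cl ps →
      pvLoopB bl ml f (ps.map Prod.fst) cl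
        = PySem.Set.update cl ((ps.map Prod.fst).flatMap (pvRch bl ml)) := by
  intro f
  induction f with
  | zero =>
    intro ps cl hf hinv
    cases ps with
    | nil => simp [pvLoopB, PySem.Set.update_nil]
    | cons p ps =>
      exfalso
      have hpow : 0 < (bl.length + 1) ^ pvBeta ml p.1 := pow_pos (by omega) _
      simp only [pvMu, List.map_cons, List.sum_cons] at hf
      omega
  | succ f ih =>
    intro ps cl hf hinv
    cases ps with
    | nil => simp [pvLoopB, PySem.Set.update_nil]
    | cons p ps =>
      obtain ⟨e, O⟩ := p
      obtain ⟨ha, hc, htail⟩ := hinv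
      rw [List.map_cons] at hf ⊢
      by_cases hcond : (e.length : Int) ≤ ml ∧ PySem.Set.contains cl e = false
      · obtain ⟨hle, hnc⟩ := hcond
        have hlen' : ¬ (e.length : Int) > ml := by omega
        have hRch := pvRch_cons bl ml hw e hlen'
        rw [pvLoopB_succ_cons, if_pos ⟨hle, hnc⟩]
        -- the new stack is the mapped-fst of the children entries followed by ps
        have hstack : (bl.map fun w => e ++ w) ++ ps.map Prod.fst
            = (((bl.map fun w => (e ++ w, e :: O)) ++ ps).map Prod.fst) := by
          simp [List.map_map, Function.comp_def]
        -- invariant for the new state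
        have hcl' : ∀ t ∈ PySem.Set.add cl e, t ∈ e :: O ∨ ∀ u ∈ pvRch bl ml t, u ∈ PySem.Set.add cl e := by
          intro t ht
          rcases (PySem.Set.mem_add _ _ _).1 ht with ht | rfl
          · rcases hc t ht with h | h
            · exact Or.inl (List.mem_cons_of_mem _ h)
            · exact Or.inr fun u hu => (PySem.Set.mem_add _ _ _).2 (Or.inl (h u hu))
          · exact Or.inl List.mem_cons_self
        have hps' : pvInv bl ml
            (PySem.Set.update (PySem.Set.add cl e) (bl.flatMap fun w => pvRch bl ml (e ++ w))) ps := by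
          rw [hRch, PySem.Set.update_cons] at htail
          exact htail
        have hinv' := pvInv_children bl ml hw e O ha bl (PySem.Set.add cl e) ps
          (fun _ h => h) hcl' hps'
        -- fuel accounting: the expanded entry pays for all its children
        have hml0 : 0 ≤ ml := le_trans (Int.natCast_nonneg _) hle
        have hbe : 2 ≤ pvBeta ml e := by unfold pvBeta; omega
        have hch : ((bl.map fun w => e ++ w).map fun s => (bl.length + 1) ^ pvBeta ml s).sum
            ≤ bl.length * (bl.length + 1) ^ (pvBeta ml e - 1) := by
          have hb : ∀ x ∈ (bl.map fun w => e ++ w).map fun s => (bl.length + 1) ^ pvBeta ml s,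
              x ≤ (bl.length + 1) ^ (pvBeta ml e - 1) := by
            intro x hx
            rw [List.mem_map] at hx
            obtain ⟨s, hs, rfl⟩ := hx
            rw [List.mem_map] at hs
            obtain ⟨w, hwbl, rfl⟩ := hs
            have hlw : 0 < w.length := List.length_pos_iff.mpr (hw w hwbl)
            refine Nat.pow_le_pow_right (by omega) ?_
            unfold pvBeta
            simp only [List.length_append]
            omega
          have := List.sum_le_card_nsmul _ _ hb
          simpa [List.length_map, smul_eq_mul] using this
        have hsplit : pvBeta ml e = (pvBeta ml e - 1) + 1 := by omega
        have hppos : 0 < (bl.length + 1) ^ (pvBeta ml e - 1) := pow_pos (by omega) _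
        have hlt : bl.length * (bl.length + 1) ^ (pvBeta ml e - 1) < (bl.length + 1) ^ pvBeta ml e := by
          have h1 : bl.length * (bl.length + 1) ^ (pvBeta ml e - 1)
              < (bl.length + 1) ^ ((pvBeta ml e - 1) + 1) := by
            rw [pow_succ]
            calc bl.length * (bl.length + 1) ^ (pvBeta ml e - 1)
                = (bl.length + 1) ^ (pvBeta ml e - 1) * bl.length := by ring
              _ < (bl.length + 1) ^ (pvBeta ml e - 1) * (bl.length + 1) :=
                  Nat.mul_lt_mul_of_pos_left (by omega) hppos
          rwa [← hsplit] at h1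
        have hfuel : f ≥ pvMu bl ml ((((bl.map fun w => (e ++ w, e :: O)) ++ ps).map Prod.fst)) := by
          rw [← hstack]
          simp only [pvMu, List.map_cons, List.sum_cons, List.map_append, List.sum_append] at hf ⊢
          omega
        rw [hstack, ih _ _ hfuel hinv', ← hstack]
        -- combine the updates back into one
        have hfm : (bl.map fun w => e ++ w).flatMap (pvRch bl ml)
            = bl.flatMap fun w => pvRch bl ml (e ++ w) := by
          rw [List.flatMap_map]
        rw [List.flatMap_append, hfm, List.flatMap_cons, hRch, List.cons_append,
          PySem.Set.update_cons]
      · rw [pvLoopB_succ_cons, if_neg hcond]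
        have hskip : PySem.Set.update cl (pvRch bl ml e) = cl := by
          rcases Decidable.not_and_iff_or_not.1 hcond with hlen | hnc
          · rw [pvRch_eq_nil bl ml e (by omega), PySem.Set.update_nil]
          · have hmem : e ∈ cl := by
              rw [← PySem.Set.contains_iff]
              rcases Bool.eq_false_or_eq_true (PySem.Set.contains cl e) with h | h
              · exact h
              · exact absurd h hnc
            rcases hc e hmem with hO' | hsub
            · exact absurd (ha e hO') (lt_irrefl _)
            · exact pvUpdate_of_subset cl _ hsub
        have hfuel : f ≥ pvMu bl ml (ps.map Prod.fst) := by
          have hpow : 0 < (bl.length + 1) ^ pvBeta ml e := pow_pos (by omega) _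
          simp only [pvMu, List.map_cons, List.sum_cons] at hf ⊢
          omega
        rw [hskip] at htail
        rw [ih _ _ hfuel htail, List.flatMap_cons, PySem.Set.update_append, hskip]

-- ===== VERDICT (by name: the statement is the Claim_ definition above) =====
theorem kleene_closure_generator_spec : Claim_equal_kleene_closure_generator := by
  intro bl ml _ hpre
  unfold Spec_kleene_closure_generator kleene_closure_generator kleene_closure_generator_alt
  congr 1
  rcases hpre with hml | hne
  · -- max_length < 0: A's generate and B's loop both stop at once; the result is {""}
    have h0 : ((([] : List Char).length : Int)) > ml := by simp; omega
    have hA : pvGenA (bl.map String.toList) ml (ml.toNat + 3)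
        (PySem.Set.add PySem.Set.empty []) [] = PySem.Set.add PySem.Set.empty [] := by
      show pvGenA (bl.map String.toList) ml ((ml.toNat + 2) + 1) _ _ = _
      rw [pvGenA_succ, if_pos h0]
    have hL0 : ∀ (f : Nat) (c : PySem.Set (List Char)),
        pvLoopB (bl.map String.toList) ml f [] c = c := by
      intro f c; cases f <;> rfl
    have hcond : ¬(((([] : List Char).length : Int)) ≤ ml ∧
        PySem.Set.contains PySem.Set.empty ([] : List Char) = false) := by
      intro h
      have := h.1
      simp at this
      omega
    have hp : 0 < (bl.length + 1) ^ (ml.toNat + 2) := pow_pos (by omega) _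
    have hFeq : (bl.length + 1) ^ (ml.toNat + 2)
        = ((bl.length + 1) ^ (ml.toNat + 2) - 1) + 1 := by omega
    have hB : pvLoopB (bl.map String.toList) ml ((bl.length + 1) ^ (ml.toNat + 2)) [[]]
        PySem.Set.empty = PySem.Set.empty := by
      rw [hFeq, pvLoopB_succ_cons, if_neg hcond, hL0]
    rw [hA, hB]
  have hw : ∀ w ∈ bl.map String.toList, w ≠ [] := by
    intro w hwm
    rw [List.mem_map] at hwm
    obtain ⟨x, hx, rfl⟩ := hwm
    intro hnil
    exact hne (String.toList_eq_nil_iff.mp hnil ▸ hx)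
  have hmemA : ([] : List Char) ∈ PySem.Set.add PySem.Set.empty [] := by
    simp
  rw [pvGenA_eq_update (bl.map String.toList) ml (ml.toNat + 3) _ _ hmemA]
  have hreach : pvReach (bl.map String.toList) ml (ml.toNat + 3) []
      = pvRch (bl.map String.toList) ml [] := rfl
  rw [hreach]
  have hf0 : ((bl.length + 1) ^ (ml.toNat + 2))
      ≥ pvMu (bl.map String.toList) ml ([(([] : List Char), ([] : List (List Char)))].map Prod.fst) := by
    simp [pvMu, pvBeta]
  have hinv0 : pvInv (bl.map String.toList) ml PySem.Set.empty
      [(([] : List Char), ([] : List (List Char)))] :=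
    ⟨by simp, by simp [PySem.Set.empty], trivial⟩
  have hB := pvLoopB_main (bl.map String.toList) ml hw ((bl.length + 1) ^ (ml.toNat + 2))
    [(([] : List Char), ([] : List (List Char)))] PySem.Set.empty hf0 hinv0
  simp only [List.map_cons, List.map_nil, List.flatMap_cons, List.flatMap_nil,
    List.append_nil] at hB
  rw [hB]
  by_cases h0 : ((([] : List Char).length : Int)) > ml
  · rw [pvRch_eq_nil (bl.map String.toList) ml [] h0]
    simp [PySem.Set.update_nil]
  · rw [pvRch_cons (bl.map String.toList) ml hw [] h0, PySem.Set.update_cons,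
      PySem.Set.update_cons,
      PySem.Set.add_of_mem (show ([] : List Char) ∈ PySem.Set.add PySem.Set.empty [] from hmemA),
      PySem.Set.add_of_mem (show ([] : List Char) ∈
        PySem.Set.update (PySem.Set.add PySem.Set.empty [])
          ((bl.map String.toList).flatMap fun w => pvRch (bl.map String.toList) ml ([] ++ w)) from
        by simp [PySem.Set.mem_update])]
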